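-- pv_equiv track=rewrite | github.com/ASSERT-KTH/Mokav | experiments/pynguin/c4b/return-lst/generated_tests/src_580/1/src_580.py | func
-- ===== SOURCE A (Python) =====
-- def func(*args):
-- 	ret_values = []
--
-- 	n = int(args[0])
-- 	if (n == 0):
-- 	    ret_values.append(1)
-- 	else:
-- 	    n %= 4
-- 	    res = 6
-- 	    for i in range(1, (n + 1)):
-- 	        res *= 8
-- 	    ret_values.append((res % 10))
--
-- 	return ret_values
-- ===== SOURCE B (Python) =====
-- def func(*args):
--     n = int(args[0])
--     if n == 0:
--         return [1]
--     return [[6, 8, 4, 2][n % 4]]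
-- ===== Notes on version B (the rewrite author's own statement) =====
-- stated objective: simpler
-- what changed: Replaces the multiplication loop computing the last digit of six times a power of eight with a precomputed four-entry lookup table indexed by n mod four (closed form vs iteration).
import Mathlib
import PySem

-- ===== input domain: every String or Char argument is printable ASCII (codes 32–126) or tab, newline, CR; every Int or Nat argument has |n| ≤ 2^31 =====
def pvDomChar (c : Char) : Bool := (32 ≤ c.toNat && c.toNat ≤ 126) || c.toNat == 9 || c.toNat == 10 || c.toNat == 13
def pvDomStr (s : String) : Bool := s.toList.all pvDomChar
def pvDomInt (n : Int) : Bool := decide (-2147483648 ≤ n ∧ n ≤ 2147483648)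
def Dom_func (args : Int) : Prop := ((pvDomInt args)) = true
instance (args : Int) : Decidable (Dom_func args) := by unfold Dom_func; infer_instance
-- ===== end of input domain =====

-- B replaces A's multiplication loop by a precomputed 4-entry last-digit table: simpler, no loop.

-- ===== PORT A =====
def func (args : Int) : List Int :=
  if args = 0 then [1]
  else
    let n := PySem.Int.mod args 4
    let res := (PySem.List.pyRange 1 (n + 1) 1).foldl (fun r _ => r * 8) 6
    [PySem.Int.mod res 10]

-- ===== PORT B =====
def func_alt (args : Int) : List Int :=
  if args = 0 then [1]
  else [PySem.List.pyGetD ([6, 8, 4, 2] : List Int) (PySem.Int.mod args 4) 0]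

-- ===== PRECONDITION & SPEC =====
def Spec_func (args : Int) (out : List Int) : Prop := out = func_alt args
instance (args : Int) (out : List Int) : Decidable (Spec_func args out) := by unfold Spec_func; infer_instance

-- ===== CLAIM (what is proved, stated in full; the proofs are below) =====
def Claim_equal_func : Prop := ∀ (args : Int), Dom_func args → Spec_func args (func args)

-- ===== LEMMAS AND PROOFS =====

-- ===== VERDICT (by name: the statement is the Claim_ definition above) =====
theorem func_spec : Claim_equal_func := by
  intro args _
  unfold Spec_func func func_alt
  by_cases h0 : args = 0
  · simp [h0]
  · have h1 : 0 ≤ PySem.Int.mod args 4 := PySem.Int.mod_nonneg args (by norm_num)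
    have h2 : PySem.Int.mod args 4 < 4 := PySem.Int.mod_lt args (by norm_num)
    have : PySem.Int.mod args 4 = 0 ∨ PySem.Int.mod args 4 = 1 ∨
           PySem.Int.mod args 4 = 2 ∨ PySem.Int.mod args 4 = 3 := by omega
    rcases this with h | h | h | h <;> simp only [if_neg h0, h] <;> decide
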